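-- pv_equiv track=rewrite | github.com/MaxPoon/Google-Code-Jam | Kickstart-Round-G-2017/q3.py | maxCoinOfSubmatrix
-- ===== SOURCE A (Python) =====
-- def maxCoinOfSubmatrix(matrix, top, bottom, left, right, minOfSubmatrix, memo):
-- 	if top == bottom and left == right:
-- 		return 0
-- 	if (top, bottom, left, right) in memo:
-- 		return memo[(top, bottom, left, right)]
-- 	current_max = 0
-- 	for row in range(top, bottom):
-- 		current_max = max(current_max, maxCoinOfSubmatrix(matrix, top, row, left, right, minOfSubmatrix, memo) + maxCoinOfSubmatrix(matrix, row+1, bottom, left, right, minOfSubmatrix, memo))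
-- 	for col in range(left, right):
-- 		current_max = max(current_max, maxCoinOfSubmatrix(matrix, top, bottom, left, col, minOfSubmatrix, memo)+ maxCoinOfSubmatrix(matrix, top, bottom, col+1, right, minOfSubmatrix, memo))
-- 	current_max += minOfSubmatrix[(top, bottom, left, right)]
-- 	memo[(top, bottom, left, right)] = current_max
-- 	return current_max
-- ===== SOURCE B (Python) =====
-- def maxCoinOfSubmatrix(matrix, top, bottom, left, right, minOfSubmatrix, memo):
--     # Iterative bottom-up DP instead of memoized top-down recursion: first collect
--     # the set of sub-rectangles actually demanded (pruned at single cells and at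
--     # entries of the incoming memo), then fill a table over them in increasing size
--     # order.  Does not mutate the caller's memo (return value only).
--     root = (top, bottom, left, right)
--     if top == bottom and left == right:
--         return 0
--     if root in memo:
--         return memo[root]
--
--     needed = {}  # insertion-ordered set of keys to compute
--
--     def collect(k):
--         if k in needed:
--             return
--         t, b, l, r = k
--         if (t == b and l == r) or k in memo:
--             return
--         needed[k] = True
--         for row in range(t, b):
--             collect((t, row, l, r))
--             collect((row + 1, b, l, r))
--         for col in range(l, r):
--             collect((t, b, l, col))
--             collect((t, b, col + 1, r))
--
--     collect(root)
--
--     table = {}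
--
--     def val(k):
--         t, b, l, r = k
--         if t == b and l == r:
--             return 0
--         if k in memo:
--             return memo[k]
--         return table[k]
--
--     for k in sorted(needed, key=lambda k: (k[1] - k[0]) + (k[3] - k[2])):
--         t, b, l, r = k
--         best = 0
--         for row in range(t, b):
--             best = max(best, val((t, row, l, r)) + val((row + 1, b, l, r)))
--         for col in range(l, r):
--             best = max(best, val((t, b, l, col)) + val((t, b, col + 1, r)))
--         table[k] = best + minOfSubmatrix[k]
--     return table[root]
-- ===== Notes on version B (the rewrite author's own statement) =====
-- stated objective: alternative
-- what changed: Replaces the top-down memoized recursion (which threads a mutable memo dict through nested recursive calls) by an iterative bottom-up DP: first collect the set of sub-rectangles actually demanded (pruned at single cells and at incoming memo entries), then fill a table over them in increasing size order; no mutation of the caller's memo (return value only).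
-- outside the precondition, e.g. on maxCoinOfSubmatrix([], 1, 0, 0, 0, {(1, 0, 0, 0): 4}, {}): A returns 4, B returns 4
import Mathlib
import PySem

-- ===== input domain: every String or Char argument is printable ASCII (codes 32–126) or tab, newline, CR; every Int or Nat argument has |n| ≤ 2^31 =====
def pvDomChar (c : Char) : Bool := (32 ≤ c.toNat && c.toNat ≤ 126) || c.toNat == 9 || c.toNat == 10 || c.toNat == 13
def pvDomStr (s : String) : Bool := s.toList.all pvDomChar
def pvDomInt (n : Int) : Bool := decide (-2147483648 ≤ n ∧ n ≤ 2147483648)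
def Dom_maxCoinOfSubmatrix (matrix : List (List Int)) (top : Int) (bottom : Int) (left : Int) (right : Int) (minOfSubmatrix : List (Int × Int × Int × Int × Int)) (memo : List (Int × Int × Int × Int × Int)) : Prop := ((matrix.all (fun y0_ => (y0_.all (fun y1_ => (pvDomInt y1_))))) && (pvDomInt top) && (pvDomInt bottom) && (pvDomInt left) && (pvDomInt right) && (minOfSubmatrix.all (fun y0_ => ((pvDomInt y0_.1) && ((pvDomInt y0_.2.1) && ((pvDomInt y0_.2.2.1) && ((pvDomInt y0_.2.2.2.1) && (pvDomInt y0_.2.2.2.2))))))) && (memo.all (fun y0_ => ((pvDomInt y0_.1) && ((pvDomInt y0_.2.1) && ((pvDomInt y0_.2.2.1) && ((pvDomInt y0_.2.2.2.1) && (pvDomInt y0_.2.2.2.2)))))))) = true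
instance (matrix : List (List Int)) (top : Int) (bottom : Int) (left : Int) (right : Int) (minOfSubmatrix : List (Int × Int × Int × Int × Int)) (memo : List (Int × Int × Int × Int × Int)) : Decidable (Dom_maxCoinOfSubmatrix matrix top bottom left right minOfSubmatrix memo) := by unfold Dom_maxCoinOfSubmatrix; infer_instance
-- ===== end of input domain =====

-- B replaces the top-down memoized recursion by an iterative bottom-up DP over the
-- demanded sub-rectangles sorted by size (alternative decomposition, same cost).  A mutates
-- the caller's memo dict in place; B does not — the equivalence proved here is about the
-- RETURN value only.

abbrev pvK := Int × Int × Int × Int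

-- ===== PORT A =====
-- (t, b, l, r, v) ↦ ((t, b, l, r), v): the flat 5-tuples of the dict arguments as key/value pairs
def pvKey5 (x : Int × Int × Int × Int × Int) : pvK × Int :=
  ((x.1, x.2.1, x.2.2.1, x.2.2.2.1), x.2.2.2.2)

-- the pairs of sub-rectangles produced by 'for row in range(top, bottom)'
def pvRowPairs (t b l r : Int) : List (pvK × pvK) :=
  (PySem.List.pyRange t b 1).map (fun row => ((t, row, l, r), (row + 1, b, l, r)))

-- the pairs of sub-rectangles produced by 'for col in range(left, right)'
def pvColPairs (t b l r : Int) : List (pvK × pvK) :=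
  (PySem.List.pyRange l r 1).map (fun col => ((t, b, l, col), (t, b, col + 1, r)))

-- A's recursion; fuel-indexed (the top level passes enough fuel for every input; none = KeyError).
-- The two Python loops are the two foldl's over pvRowPairs/pvColPairs threading (current_max, memo).
def pvGoA (minD : PySem.Dict pvK Int) :
    Nat → Int → Int → Int → Int → PySem.Dict pvK Int → Option (Int × PySem.Dict pvK Int)
  | 0, _, _, _, _, _ => none
  | fuel + 1, t, b, l, r, memo =>
    if t = b ∧ l = r then some (0, memo)
    else
      match memo.get? (t, b, l, r) with
      | some v => some (v, memo)
      | none =>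
        match (pvColPairs t b l r).foldl
            (fun st p => st.bind fun s =>
              (pvGoA minD fuel p.1.1 p.1.2.1 p.1.2.2.1 p.1.2.2.2 s.2).bind fun a =>
                (pvGoA minD fuel p.2.1 p.2.2.1 p.2.2.2.1 p.2.2.2.2 a.2).bind fun c =>
                  some (max s.1 (a.1 + c.1), c.2))
            ((pvRowPairs t b l r).foldl
              (fun st p => st.bind fun s =>
                (pvGoA minD fuel p.1.1 p.1.2.1 p.1.2.2.1 p.1.2.2.2 s.2).bind fun a =>
                  (pvGoA minD fuel p.2.1 p.2.2.1 p.2.2.2.1 p.2.2.2.2 a.2).bind fun c =>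
                    some (max s.1 (a.1 + c.1), c.2))
              (some (0, memo))) with
        | none => none
        | some s =>
          match minD.get? (t, b, l, r) with
          | none => none  -- KeyError: minOfSubmatrix[(t, b, l, r)] missing (excluded by Pre_)
          | some mv => some (s.1 + mv, s.2.insert (t, b, l, r) (s.1 + mv))

def maxCoinOfSubmatrix (matrix : List (List Int)) (top : Int) (bottom : Int) (left : Int) (right : Int) (minOfSubmatrix : List (Int × Int × Int × Int × Int)) (memo : List (Int × Int × Int × Int × Int)) : Int :=
  match pvGoA (PySem.Dict.ofList (minOfSubmatrix.map pvKey5))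
      ((bottom - top).toNat + (right - left).toNat + 1) top bottom left right
      (PySem.Dict.ofList (memo.map pvKey5)) with
  | some s => s.1
  | none => 0  -- unreachable under Pre_ (Python raises KeyError there)

-- ===== PORT B =====
-- sort key: lambda k: (k[1] - k[0]) + (k[3] - k[2])
def pvMeasI (k : pvK) : Int := (k.2.1 - k.1) + (k.2.2.2 - k.2.2.1)

-- Source B's collect(k): the insertion-ordered set 'needed' of demanded sub-rectangles
-- (pruned at single cells and at entries of the incoming memo); fuel-indexed — the
-- top level passes enough fuel (children are strictly smaller) so the 0 case never fires.
def pvCollect (memo₀ : PySem.Dict pvK Int) : Nat → pvK → List pvK → List pvK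
  | 0, _, needed => needed
  | fuel + 1, k, needed =>
    if k ∈ needed then needed
    else if (k.1 = k.2.1 ∧ k.2.2.1 = k.2.2.2) ∨ memo₀.contains k = true then needed
    else
      (pvRowPairs k.1 k.2.1 k.2.2.1 k.2.2.2 ++ pvColPairs k.1 k.2.1 k.2.2.1 k.2.2.2).foldl
        (fun s p => pvCollect memo₀ fuel p.2 (pvCollect memo₀ fuel p.1 s))
        (needed ++ [k])

-- Source B's val(k): 0 on a single cell, else memo[k] if present, else table[k] (none = KeyError)
def pvVal2 (memo₀ table : PySem.Dict pvK Int) (k : pvK) : Option Int :=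
  if k.1 = k.2.1 ∧ k.2.2.1 = k.2.2.2 then some 0
  else match memo₀.get? k with
    | some v => some v
    | none => table.get? k

-- the 'best' accumulation over the row cuts then the col cuts
def pvBestB (memo₀ table : PySem.Dict pvK Int) (t b l r : Int) : Option Int :=
  (pvRowPairs t b l r ++ pvColPairs t b l r).foldl
    (fun acc p => acc.bind fun cm =>
      (pvVal2 memo₀ table p.1).bind fun v1 =>
        (pvVal2 memo₀ table p.2).bind fun v2 =>
          some (max cm (v1 + v2)))
    (some 0)

-- one iteration of B's main loop: fill table[k]
def pvStepB (minD memo₀ : PySem.Dict pvK Int) (ot : Option (PySem.Dict pvK Int)) (k : pvK) :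
    Option (PySem.Dict pvK Int) :=
  ot.bind fun table =>
    match pvBestB memo₀ table k.1 k.2.1 k.2.2.1 k.2.2.2 with
    | none => none
    | some best =>
      match minD.get? k with
      | none => none  -- KeyError on minOfSubmatrix[k]
      | some mv => some (table.insert k (best + mv))

def maxCoinOfSubmatrix_alt (matrix : List (List Int)) (top : Int) (bottom : Int) (left : Int) (right : Int) (minOfSubmatrix : List (Int × Int × Int × Int × Int)) (memo : List (Int × Int × Int × Int × Int)) : Int :=
  if top = bottom ∧ left = right then 0
  else
    match (PySem.Dict.ofList (memo.map pvKey5)).get? (top, bottom, left, right) with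
    | some v => v
    | none =>
      match (PySem.List.sorted
            (pvCollect (PySem.Dict.ofList (memo.map pvKey5))
              ((bottom - top).toNat + (right - left).toNat + 1) (top, bottom, left, right) [])
            pvMeasI false).foldl
          (pvStepB (PySem.Dict.ofList (minOfSubmatrix.map pvKey5))
                   (PySem.Dict.ofList (memo.map pvKey5)))
          (some PySem.Dict.empty) with
      | none => 0  -- unreachable under Pre_
      | some table =>
        match table.get? (top, bottom, left, right) with
        | some v => v
        | none => 0  -- unreachable under Pre_

-- ===== PRECONDITION & SPEC =====
-- A raises KeyError when some demanded sub-rectangle key is missing from minOfSubmatrix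
-- (B raises there too); that demanded set is recursive, so Pre_ is a closed-form SUFFICIENT
-- no-KeyError condition — single cell, or a memo hit at the root, or an ordered range with
-- every non-single-cell sub-rectangle key present in minOfSubmatrix — which conservatively
-- also excludes some sparse or inverted inputs on which A returns; B returns the identical
-- value on those, the exclusion only reflects that the exact demanded-key set is not closed-form.
-- (The two length-bound conjuncts are IMPLIED by the key-coverage condition; they are stated
-- first only so the predicate is efficiently decidable — short-circuit on huge ranges.)
def Pre_maxCoinOfSubmatrix (matrix : List (List Int)) (top : Int) (bottom : Int) (left : Int) (right : Int) (minOfSubmatrix : List (Int × Int × Int × Int × Int)) (memo : List (Int × Int × Int × Int × Int)) : Prop :=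
  (top = bottom ∧ left = right) ∨
  (PySem.Dict.ofList (memo.map pvKey5)).contains (top, bottom, left, right) = true ∨
  (top ≤ bottom ∧ left ≤ right ∧
   bottom - top ≤ (minOfSubmatrix.length : Int) ∧ right - left ≤ (minOfSubmatrix.length : Int) ∧
   ∀ t ∈ PySem.List.pyRange top (bottom + 1) 1,
     ∀ b ∈ PySem.List.pyRange t (bottom + 1) 1,
       ∀ l ∈ PySem.List.pyRange left (right + 1) 1,
         ∀ r ∈ PySem.List.pyRange l (right + 1) 1,
           ¬(t = b ∧ l = r) →
           (PySem.Dict.ofList (minOfSubmatrix.map pvKey5)).contains (t, b, l, r) = true)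
instance (matrix : List (List Int)) (top : Int) (bottom : Int) (left : Int) (right : Int) (minOfSubmatrix : List (Int × Int × Int × Int × Int)) (memo : List (Int × Int × Int × Int × Int)) : Decidable (Pre_maxCoinOfSubmatrix matrix top bottom left right minOfSubmatrix memo) := by unfold Pre_maxCoinOfSubmatrix; infer_instance

def pvWitness_maxCoinOfSubmatrix : List (List Int) × Int × Int × Int × Int × (List (Int × Int × Int × Int × Int)) × (List (Int × Int × Int × Int × Int)) :=
  ([[1, 2]], 0, 0, 0, 1, [(0, 0, 0, 1, 3)], [])

def Spec_maxCoinOfSubmatrix (matrix : List (List Int)) (top : Int) (bottom : Int) (left : Int) (right : Int) (minOfSubmatrix : List (Int × Int × Int × Int × Int)) (memo : List (Int × Int × Int × Int × Int)) (out : Int) : Prop := out = maxCoinOfSubmatrix_alt matrix top bottom left right minOfSubmatrix memo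
instance (matrix : List (List Int)) (top : Int) (bottom : Int) (left : Int) (right : Int) (minOfSubmatrix : List (Int × Int × Int × Int × Int)) (memo : List (Int × Int × Int × Int × Int)) (out : Int) : Decidable (Spec_maxCoinOfSubmatrix matrix top bottom left right minOfSubmatrix memo out) := by unfold Spec_maxCoinOfSubmatrix; infer_instance

-- ===== CLAIM (what is proved, stated in full; the proofs are below) =====
def Claim_equal_maxCoinOfSubmatrix : Prop := ∀ (matrix : List (List Int)) (top : Int) (bottom : Int) (left : Int) (right : Int) (minOfSubmatrix : List (Int × Int × Int × Int × Int)) (memo : List (Int × Int × Int × Int × Int)), Dom_maxCoinOfSubmatrix matrix top bottom left right minOfSubmatrix memo → Pre_maxCoinOfSubmatrix matrix top bottom left right minOfSubmatrix memo → Spec_maxCoinOfSubmatrix matrix top bottom left right minOfSubmatrix memo (maxCoinOfSubmatrix matrix top bottom left right minOfSubmatrix memo)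

-- ===== LEMMAS AND PROOFS =====

-- size of a rectangle key: the recursion/DP measure
def pvMeas (k : pvK) : Nat := (k.2.1 - k.1).toNat + (k.2.2.2 - k.2.2.1).toNat

-- k' is an ordered sub-rectangle of k
def pvSub (k' k : pvK) : Prop :=
  k.1 ≤ k'.1 ∧ k'.1 ≤ k'.2.1 ∧ k'.2.1 ≤ k.2.1 ∧
  k.2.2.1 ≤ k'.2.2.1 ∧ k'.2.2.1 ≤ k'.2.2.2 ∧ k'.2.2.2 ≤ k.2.2.2

-- k is not a single cell
def pvNS (k : pvK) : Prop := ¬(k.1 = k.2.1 ∧ k.2.2.1 = k.2.2.2)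

-- the common pure value: guillotine-cut optimum honouring the INITIAL memo, by fuel
def pvV (minD memo₀ : PySem.Dict pvK Int) : Nat → pvK → Int
  | 0, _ => 0
  | fuel + 1, k =>
    if k.1 = k.2.1 ∧ k.2.2.1 = k.2.2.2 then 0
    else
      match memo₀.get? k with
      | some v => v
      | none =>
        ((pvRowPairs k.1 k.2.1 k.2.2.1 k.2.2.2 ++ pvColPairs k.1 k.2.1 k.2.2.1 k.2.2.2).foldl
          (fun cm p => max cm (pvV minD memo₀ fuel p.1 + pvV minD memo₀ fuel p.2)) 0)
        + (minD.get? k).getD 0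

def pvVT (minD memo₀ : PySem.Dict pvK Int) (k : pvK) : Int := pvV minD memo₀ (pvMeas k + 1) k

-- invariant of A's mutable memo: it extends memo₀ and every other entry is a true value
def pvInv (minD memo₀ memo : PySem.Dict pvK Int) : Prop :=
  (∀ k v, memo₀.get? k = some v → memo.get? k = some v) ∧
  (∀ k v, memo.get? k = some v → memo₀.get? k = some v ∨ v = pvVT minD memo₀ k)

-- invariant of B's table: every entry is a true value
def pvGood (minD memo₀ table : PySem.Dict pvK Int) : Prop :=
  ∀ k v, table.get? k = some v → v = pvVT minD memo₀ k

-- m's demanded children all lie in S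
def pvClosed (memo₀ : PySem.Dict pvK Int) (S : List pvK) (m : pvK) : Prop :=
  ∀ p ∈ pvRowPairs m.1 m.2.1 m.2.2.1 m.2.2.2 ++ pvColPairs m.1 m.2.1 m.2.2.1 m.2.2.2,
    (pvNS p.1 → memo₀.get? p.1 = none → p.1 ∈ S) ∧
    (pvNS p.2 → memo₀.get? p.2 = none → p.2 ∈ S)

lemma pvK_eta (k : pvK) : ((k.1, k.2.1, k.2.2.1, k.2.2.2) : pvK) = k := rfl

lemma pvPairs_meas (t b l r : Int) :
    ∀ p ∈ pvRowPairs t b l r ++ pvColPairs t b l r,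
      pvMeas p.1 < pvMeas (t, b, l, r) ∧ pvMeas p.2 < pvMeas (t, b, l, r) := by
  intro p hp
  rcases List.mem_append.1 hp with h | h
  · rcases List.mem_map.1 h with ⟨row, hrow, rfl⟩
    rw [PySem.List.mem_pyRange_one] at hrow
    simp only [pvMeas]
    omega
  · rcases List.mem_map.1 h with ⟨col, hcol, rfl⟩
    rw [PySem.List.mem_pyRange_one] at hcol
    simp only [pvMeas]
    omega

lemma pvPairs_sub (t b l r : Int) (htb : t ≤ b) (hlr : l ≤ r) :
    ∀ p ∈ pvRowPairs t b l r ++ pvColPairs t b l r,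
      pvSub p.1 (t, b, l, r) ∧ pvSub p.2 (t, b, l, r) := by
  intro p hp
  rcases List.mem_append.1 hp with h | h
  · rcases List.mem_map.1 h with ⟨row, hrow, rfl⟩
    rw [PySem.List.mem_pyRange_one] at hrow
    simp only [pvSub]
    omega
  · rcases List.mem_map.1 h with ⟨col, hcol, rfl⟩
    rw [PySem.List.mem_pyRange_one] at hcol
    simp only [pvSub]
    omega

lemma pvSub_trans {k1 k2 k3 : pvK} (h1 : pvSub k1 k2) (h2 : pvSub k2 k3) : pvSub k1 k3 := by
  simp only [pvSub] at *; omega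

lemma pvV_fuel (minD memo₀ : PySem.Dict pvK Int) :
    ∀ f g k, pvMeas k < f → pvMeas k < g → pvV minD memo₀ f k = pvV minD memo₀ g k := by
  intro f
  induction f with
  | zero => omega
  | succ f ih =>
    intro g k hf hg
    cases g with
    | zero => omega
    | succ g =>
      simp only [pvV]
      split
      · rfl
      · cases memo₀.get? k with
        | some v => rfl
        | none =>
          simp only []
          congr 1
          apply PySem.List.foldl_congr_mem
          intro cm p hp
          have := pvPairs_meas k.1 k.2.1 k.2.2.1 k.2.2.2 p hp
          rw [pvK_eta] at this
          rw [ih g p.1 (by omega) (by omega), ih g p.2 (by omega) (by omega)]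

lemma pvV_eq_VT (minD memo₀ : PySem.Dict pvK Int) (f : Nat) (k : pvK) (h : pvMeas k < f) :
    pvV minD memo₀ f k = pvVT minD memo₀ k :=
  pvV_fuel minD memo₀ f (pvMeas k + 1) k h (Nat.lt_succ_self _)

lemma pvVT_single (minD memo₀ : PySem.Dict pvK Int) (k : pvK) (h : k.1 = k.2.1 ∧ k.2.2.1 = k.2.2.2) :
    pvVT minD memo₀ k = 0 := by
  simp [pvVT, pvV, h]

lemma pvVT_memo (minD memo₀ : PySem.Dict pvK Int) (k : pvK) (hns : pvNS k) (v : Int)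
    (hm : memo₀.get? k = some v) : pvVT minD memo₀ k = v := by
  simp [pvVT, pvV, pvNS] at *
  split
  · exact absurd ‹_› (by tauto)
  · rw [hm]

lemma pvVT_compute (minD memo₀ : PySem.Dict pvK Int) (k : pvK) (hns : pvNS k)
    (hm : memo₀.get? k = none) :
    pvVT minD memo₀ k =
      ((pvRowPairs k.1 k.2.1 k.2.2.1 k.2.2.2 ++ pvColPairs k.1 k.2.1 k.2.2.1 k.2.2.2).foldl
        (fun cm p => max cm (pvVT minD memo₀ p.1 + pvVT minD memo₀ p.2)) 0)
      + (minD.get? k).getD 0 := by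
  simp only [pvNS] at hns
  rw [pvVT]
  simp only [pvV, if_neg hns, hm]
  congr 1
  apply PySem.List.foldl_congr_mem
  intro cm p hp
  have := pvPairs_meas k.1 k.2.1 k.2.2.1 k.2.2.2 p hp
  rw [pvK_eta] at this
  rw [pvV_eq_VT minD memo₀ _ p.1 (by omega), pvV_eq_VT minD memo₀ _ p.2 (by omega)]

-- ===== A-side correctness =====

lemma pvLoopA_ok (minD memo₀ : PySem.Dict pvK Int) (fuel : Nat)
    (IH : ∀ t b l r memo, pvMeas (t, b, l, r) < fuel → t ≤ b → l ≤ r →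
      pvInv minD memo₀ memo →
      (∀ k', pvSub k' (t, b, l, r) → pvNS k' → (minD.get? k').isSome) →
      ∃ memo', pvGoA minD fuel t b l r memo = some (pvVT minD memo₀ (t, b, l, r), memo') ∧
        pvInv minD memo₀ memo') :
    ∀ (ps : List (pvK × pvK)) (cm : Int) (memo : PySem.Dict pvK Int),
      pvInv minD memo₀ memo →
      (∀ p ∈ ps,
        (pvMeas p.1 < fuel ∧ p.1.1 ≤ p.1.2.1 ∧ p.1.2.2.1 ≤ p.1.2.2.2 ∧
          (∀ k', pvSub k' p.1 → pvNS k' → (minD.get? k').isSome)) ∧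
        (pvMeas p.2 < fuel ∧ p.2.1 ≤ p.2.2.1 ∧ p.2.2.2.1 ≤ p.2.2.2.2 ∧
          (∀ k', pvSub k' p.2 → pvNS k' → (minD.get? k').isSome))) →
      ∃ memo', ps.foldl
          (fun st p => st.bind fun s =>
            (pvGoA minD fuel p.1.1 p.1.2.1 p.1.2.2.1 p.1.2.2.2 s.2).bind fun a =>
              (pvGoA minD fuel p.2.1 p.2.2.1 p.2.2.2.1 p.2.2.2.2 a.2).bind fun c =>
                some (max s.1 (a.1 + c.1), c.2))
          (some (cm, memo))
        = some (ps.foldl (fun c p => max c (pvVT minD memo₀ p.1 + pvVT minD memo₀ p.2)) cm, memo')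
        ∧ pvInv minD memo₀ memo' := by
  intro ps
  induction ps with
  | nil => exact fun cm memo hInv _ => ⟨memo, rfl, hInv⟩
  | cons p rest ihp =>
    intro cm memo hInv hps
    obtain ⟨⟨h1f, h1a, h1b, h1m⟩, h2f, h2a, h2b, h2m⟩ := hps p (List.mem_cons_self ..)
    obtain ⟨m1, e1, inv1⟩ := IH p.1.1 p.1.2.1 p.1.2.2.1 p.1.2.2.2 memo h1f h1a h1b hInv h1m
    obtain ⟨m2, e2, inv2⟩ := IH p.2.1 p.2.2.1 p.2.2.2.1 p.2.2.2.2 m1 h2f h2a h2b inv1 h2m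
    simp only [List.foldl_cons, Option.bind_some]
    rw [e1]
    simp only [Option.bind_some]
    rw [e2]
    simp only [Option.bind_some, pvK_eta]
    exact ihp (max cm (pvVT minD memo₀ p.1 + pvVT minD memo₀ p.2)) m2 inv2
      (fun q hq => hps q (List.mem_cons_of_mem _ hq))

lemma pvGoA_ok (minD memo₀ : PySem.Dict pvK Int) :
    ∀ fuel t b l r memo, pvMeas (t, b, l, r) < fuel → t ≤ b → l ≤ r →
      pvInv minD memo₀ memo →
      (∀ k', pvSub k' (t, b, l, r) → pvNS k' → (minD.get? k').isSome) →
      ∃ memo', pvGoA minD fuel t b l r memo = some (pvVT minD memo₀ (t, b, l, r), memo') ∧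
        pvInv minD memo₀ memo' := by
  intro fuel
  induction fuel with
  | zero => intro t b l r memo hf; omega
  | succ fuel IH =>
    intro t b l r memo hf htb hlr hInv hMin
    by_cases hs : t = b ∧ l = r
    · refine ⟨memo, ?_, hInv⟩
      rw [pvVT_single minD memo₀ (t, b, l, r) hs]
      simp [pvGoA, hs]
    · cases hm : memo.get? (t, b, l, r) with
      | some v =>
        refine ⟨memo, ?_, hInv⟩
        have hv : v = pvVT minD memo₀ (t, b, l, r) := by
          rcases hInv.2 _ _ hm with h0 | h0
          · exact (pvVT_memo minD memo₀ _ (by simp only [pvNS]; exact hs) _ h0).symm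
          · exact h0
        simp [pvGoA, hs, hm, hv]
      | none =>
        have hcond : ∀ p ∈ pvRowPairs t b l r ++ pvColPairs t b l r,
            (pvMeas p.1 < fuel ∧ p.1.1 ≤ p.1.2.1 ∧ p.1.2.2.1 ≤ p.1.2.2.2 ∧
              (∀ k', pvSub k' p.1 → pvNS k' → (minD.get? k').isSome)) ∧
            (pvMeas p.2 < fuel ∧ p.2.1 ≤ p.2.2.1 ∧ p.2.2.2.1 ≤ p.2.2.2.2 ∧
              (∀ k', pvSub k' p.2 → pvNS k' → (minD.get? k').isSome)) := by
          intro p hp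
          have hme := pvPairs_meas t b l r p hp
          have hsu := pvPairs_sub t b l r htb hlr p hp
          have hsu1 := hsu.1
          have hsu2 := hsu.2
          simp only [pvSub] at hsu1 hsu2
          exact ⟨⟨by omega, by omega, by omega,
              fun k' hk' hn => hMin k' (pvSub_trans hk' (by simp only [pvSub]; omega)) hn⟩,
            by omega, by omega, by omega,
              fun k' hk' hn => hMin k' (pvSub_trans hk' (by simp only [pvSub]; omega)) hn⟩
        obtain ⟨m1, e1, inv1⟩ := pvLoopA_ok minD memo₀ fuel IH (pvRowPairs t b l r) 0 memo hInv
          (fun p hp => hcond p (List.mem_append_left _ hp))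
        obtain ⟨m2, e2, inv2⟩ := pvLoopA_ok minD memo₀ fuel IH (pvColPairs t b l r)
          ((pvRowPairs t b l r).foldl (fun c p => max c (pvVT minD memo₀ p.1 + pvVT minD memo₀ p.2)) 0)
          m1 inv1 (fun p hp => hcond p (List.mem_append_right _ hp))
        have hm0 : memo₀.get? (t, b, l, r) = none := by
          cases h0 : memo₀.get? (t, b, l, r) with
          | none => rfl
          | some v => rw [hInv.1 _ _ h0] at hm; exact absurd hm (by simp)
        obtain ⟨mv, hmv⟩ := Option.isSome_iff_exists.1
          (hMin (t, b, l, r) (by simp only [pvSub]; omega) (by simp only [pvNS]; exact hs))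
        have hval : pvVT minD memo₀ (t, b, l, r) =
            ((pvColPairs t b l r).foldl (fun c p => max c (pvVT minD memo₀ p.1 + pvVT minD memo₀ p.2))
              ((pvRowPairs t b l r).foldl (fun c p => max c (pvVT minD memo₀ p.1 + pvVT minD memo₀ p.2)) 0))
            + mv := by
          rw [pvVT_compute minD memo₀ (t, b, l, r) (by simp only [pvNS]; exact hs) hm0]
          rw [List.foldl_append, hmv]
          rfl
        refine ⟨m2.insert (t, b, l, r)
            (((pvColPairs t b l r).foldl (fun c p => max c (pvVT minD memo₀ p.1 + pvVT minD memo₀ p.2))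
              ((pvRowPairs t b l r).foldl (fun c p => max c (pvVT minD memo₀ p.1 + pvVT minD memo₀ p.2)) 0)) + mv),
          ?_, ?_, ?_⟩
        · simp only [pvGoA, if_neg hs, hm]
          rw [e1, e2, hmv, hval]
        · intro k0 v0 h0
          by_cases hk0 : k0 = (t, b, l, r)
          · subst hk0; rw [h0] at hm0; exact absurd hm0 (by simp)
          · rw [PySem.Dict.get?_insert_of_ne _ _ hk0]
            exact inv2.1 _ _ h0
        · intro k0 v0 h0
          by_cases hk0 : k0 = (t, b, l, r)
          · subst hk0
            rw [PySem.Dict.get?_insert_self] at h0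
            right
            rw [← Option.some_inj.1 h0, hval]
          · rw [PySem.Dict.get?_insert_of_ne _ _ hk0] at h0
            exact inv2.2 _ _ h0

-- ===== B-side: properties of pvCollect =====

lemma pvCollect_fold_mono (memo₀ : PySem.Dict pvK Int) (fuel : Nat)
    (h : ∀ k s, s ⊆ pvCollect memo₀ fuel k s) :
    ∀ (ps : List (pvK × pvK)) (u : List pvK),
      u ⊆ ps.foldl (fun s p => pvCollect memo₀ fuel p.2 (pvCollect memo₀ fuel p.1 s)) u := by
  intro ps
  induction ps with
  | nil => intro u; exact fun _ hx => hx
  | cons p rest ihp =>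
    intro u
    simp only [List.foldl_cons]
    exact ((h p.1 u).trans (h p.2 _)).trans (ihp _)

lemma pvCollect_mono (memo₀ : PySem.Dict pvK Int) :
    ∀ fuel k s, s ⊆ pvCollect memo₀ fuel k s := by
  intro fuel
  induction fuel with
  | zero => intro k s; exact fun _ hx => hx
  | succ fuel ih =>
    intro k s
    simp only [pvCollect]
    split
    · exact fun _ hx => hx
    · split
      · exact fun _ hx => hx
      · exact (List.subset_append_left s [k]).trans (pvCollect_fold_mono memo₀ fuel ih _ _)

lemma pvCollect_self (memo₀ : PySem.Dict pvK Int) (fuel : Nat) (k : pvK) (s : List pvK)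
    (hf : fuel ≠ 0) (hns : pvNS k) (hm : memo₀.get? k = none) :
    k ∈ pvCollect memo₀ fuel k s := by
  cases fuel with
  | zero => exact absurd rfl hf
  | succ fuel =>
    simp only [pvCollect]
    split
    · assumption
    · split
      · rename_i hcond
        exfalso
        rcases hcond with h | h
        · exact hns h
        · rw [PySem.Dict.contains_eq_isSome_get?, hm] at h; exact absurd h (by simp)
      · exact pvCollect_fold_mono memo₀ fuel (pvCollect_mono memo₀ fuel) _ _
          (List.mem_append_right s (List.mem_singleton.2 rfl))

lemma pvCollect_sound (memo₀ : PySem.Dict pvK Int) :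
    ∀ fuel k s, k.1 ≤ k.2.1 → k.2.2.1 ≤ k.2.2.2 →
      ∀ m ∈ pvCollect memo₀ fuel k s,
        m ∈ s ∨ (pvSub m k ∧ pvNS m ∧ memo₀.get? m = none) := by
  intro fuel
  induction fuel with
  | zero => intro k s _ _ m hm; exact Or.inl hm
  | succ fuel ih =>
    intro k s hk1 hk2 m hm
    simp only [pvCollect] at hm
    split at hm
    · exact Or.inl hm
    · split at hm
      · exact Or.inl hm
      · rename_i hmem hcond
        -- fold over the children; invariant over the accumulator
        have haux : ∀ (ps : List (pvK × pvK)),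
            (∀ p ∈ ps, pvSub p.1 k ∧ pvSub p.2 k) →
            ∀ (u : List pvK),
              (∀ x ∈ u, x ∈ s ∨ (pvSub x k ∧ pvNS x ∧ memo₀.get? x = none)) →
              ∀ x ∈ ps.foldl (fun s p => pvCollect memo₀ fuel p.2 (pvCollect memo₀ fuel p.1 s)) u,
                x ∈ s ∨ (pvSub x k ∧ pvNS x ∧ memo₀.get? x = none) := by
          intro ps
          induction ps with
          | nil => intro _ u hu x hx; exact hu x hx
          | cons p rest ihp =>
            intro hps u hu x hx
            obtain ⟨hp1, hp2⟩ := hps p (List.mem_cons_self ..)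
            have hp1o : p.1.1 ≤ p.1.2.1 ∧ p.1.2.2.1 ≤ p.1.2.2.2 := by
              simp only [pvSub] at hp1; omega
            have hp2o : p.2.1 ≤ p.2.2.1 ∧ p.2.2.2.1 ≤ p.2.2.2.2 := by
              simp only [pvSub] at hp2; omega
            refine ihp (fun q hq => hps q (List.mem_cons_of_mem _ hq)) _ ?_ x hx
            intro y hy
            rcases ih p.2 _ hp2o.1 hp2o.2 y hy with hy1 | hy1
            · rcases ih p.1 _ hp1o.1 hp1o.2 y hy1 with hy2 | hy2
              · exact hu y hy2
              · exact Or.inr ⟨pvSub_trans hy2.1 hp1, hy2.2⟩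
            · exact Or.inr ⟨pvSub_trans hy1.1 hp2, hy1.2⟩
        refine haux _ ?_ (s ++ [k]) ?_ m hm
        · intro p hp
          exact pvPairs_sub k.1 k.2.1 k.2.2.1 k.2.2.2 hk1 hk2 p hp
        · intro x hx
          rcases List.mem_append.1 hx with hx | hx
          · exact Or.inl hx
          · rw [List.mem_singleton.1 hx]
            rw [not_or] at hcond
            refine Or.inr ⟨by simp only [pvSub]; omega, hcond.1, ?_⟩
            cases h0 : memo₀.get? k with
            | none => rfl
            | some v =>
              exfalso
              have := hcond.2
              rw [PySem.Dict.contains_eq_isSome_get?, h0] at this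
              exact this rfl

lemma pvClosed_mono (memo₀ : PySem.Dict pvK Int) {S S' : List pvK} (hss : S ⊆ S') (m : pvK)
    (h : pvClosed memo₀ S m) : pvClosed memo₀ S' m := by
  intro p hp
  exact ⟨fun h1 h2 => hss ((h p hp).1 h1 h2), fun h1 h2 => hss ((h p hp).2 h1 h2)⟩

lemma pvCollect_closed (memo₀ : PySem.Dict pvK Int) :
    ∀ fuel k s, k.1 ≤ k.2.1 → k.2.2.1 ≤ k.2.2.2 → pvMeas k < fuel →
      ∀ m ∈ pvCollect memo₀ fuel k s,
        m ∈ s ∨ pvClosed memo₀ (pvCollect memo₀ fuel k s) m := by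
  intro fuel
  induction fuel with
  | zero => intro k s _ _ hf; omega
  | succ fuel ih =>
    intro k s hk1 hk2 hf m hm
    by_cases hin : k ∈ s
    · rw [show pvCollect memo₀ (fuel + 1) k s = s by simp only [pvCollect]; rw [if_pos hin]] at hm ⊢
      exact Or.inl hm
    · by_cases hcond : (k.1 = k.2.1 ∧ k.2.2.1 = k.2.2.2) ∨ memo₀.contains k = true
      · rw [show pvCollect memo₀ (fuel + 1) k s = s by
          simp only [pvCollect]; rw [if_neg hin, if_pos hcond]] at hm ⊢
        exact Or.inl hm
      · have hres : pvCollect memo₀ (fuel + 1) k s =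
            (pvRowPairs k.1 k.2.1 k.2.2.1 k.2.2.2 ++ pvColPairs k.1 k.2.1 k.2.2.1 k.2.2.2).foldl
              (fun s p => pvCollect memo₀ fuel p.2 (pvCollect memo₀ fuel p.1 s)) (s ++ [k]) := by
          simp only [pvCollect]; rw [if_neg hin, if_neg hcond]
        -- the fold invariant
        have haux : ∀ (ps : List (pvK × pvK)),
            (∀ p ∈ ps, p ∈ pvRowPairs k.1 k.2.1 k.2.2.1 k.2.2.2 ++ pvColPairs k.1 k.2.1 k.2.2.1 k.2.2.2) →
            ∀ (u : List pvK),
              (∀ x ∈ u, x ∈ s ∨ x = k ∨ pvClosed memo₀ u x) →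
              (let u' := ps.foldl (fun s p => pvCollect memo₀ fuel p.2 (pvCollect memo₀ fuel p.1 s)) u
               u ⊆ u' ∧ (∀ x ∈ u', x ∈ s ∨ x = k ∨ pvClosed memo₀ u' x) ∧
               (∀ p ∈ ps, (pvNS p.1 → memo₀.get? p.1 = none → p.1 ∈ u') ∧
                          (pvNS p.2 → memo₀.get? p.2 = none → p.2 ∈ u'))) := by
          intro ps
          induction ps with
          | nil =>
            intro _ u hu
            exact ⟨fun _ hx => hx, hu, fun p hp => absurd hp (by simp)⟩
          | cons p rest ihp =>
            intro hps u hu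
            have hpmem := hps p (List.mem_cons_self ..)
            have hme := pvPairs_meas k.1 k.2.1 k.2.2.1 k.2.2.2 p hpmem
            rw [pvK_eta] at hme
            have hsu := pvPairs_sub k.1 k.2.1 k.2.2.1 k.2.2.2 hk1 hk2 p hpmem
            have hp1o : p.1.1 ≤ p.1.2.1 ∧ p.1.2.2.1 ≤ p.1.2.2.2 := by
              have := hsu.1; simp only [pvSub] at this; omega
            have hp2o : p.2.1 ≤ p.2.2.1 ∧ p.2.2.2.1 ≤ p.2.2.2.2 := by
              have := hsu.2; simp only [pvSub] at this; omega
            set u1 := pvCollect memo₀ fuel p.1 u with hu1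
            set u2 := pvCollect memo₀ fuel p.2 u1 with hu2
            have hm1 : u ⊆ u1 := pvCollect_mono memo₀ fuel p.1 u
            have hm2 : u1 ⊆ u2 := pvCollect_mono memo₀ fuel p.2 u1
            have hfuel : fuel ≠ 0 := by omega
            have hinv1 : ∀ x ∈ u1, x ∈ s ∨ x = k ∨ pvClosed memo₀ u1 x := by
              intro x hx
              rcases ih p.1 u hp1o.1 hp1o.2 (by omega) x hx with hx1 | hx1
              · rcases hu x hx1 with h | h | h
                · exact Or.inl h
                · exact Or.inr (Or.inl h)
                · exact Or.inr (Or.inr (pvClosed_mono memo₀ hm1 x h))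
              · exact Or.inr (Or.inr hx1)
            have hinv2 : ∀ x ∈ u2, x ∈ s ∨ x = k ∨ pvClosed memo₀ u2 x := by
              intro x hx
              rcases ih p.2 u1 hp2o.1 hp2o.2 (by omega) x hx with hx1 | hx1
              · rcases hinv1 x hx1 with h | h | h
                · exact Or.inl h
                · exact Or.inr (Or.inl h)
                · exact Or.inr (Or.inr (pvClosed_mono memo₀ hm2 x h))
              · exact Or.inr (Or.inr hx1)
            obtain ⟨hsub', hinv', hproc'⟩ :=
              ihp (fun q hq => hps q (List.mem_cons_of_mem _ hq)) u2 hinv2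
            refine ⟨(hm1.trans hm2).trans hsub', hinv', ?_⟩
            intro q hq
            rcases List.mem_cons.1 hq with rfl | hq
            · constructor
              · intro hns hmn
                exact hsub' (hm2 (pvCollect_self memo₀ fuel q.1 u hfuel hns hmn))
              · intro hns hmn
                exact hsub' (pvCollect_self memo₀ fuel q.2 u1 hfuel hns hmn)
            · exact hproc' q hq
        rw [hres] at hm ⊢
        obtain ⟨_, hinv', hproc'⟩ := haux _ (fun p hp => hp) (s ++ [k]) (by
          intro x hx
          rcases List.mem_append.1 hx with hx | hx
          · exact Or.inl hx
          · exact Or.inr (Or.inl (List.mem_singleton.1 hx)))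
        rcases hinv' m hm with h | h | h
        · exact Or.inl h
        · subst h
          exact Or.inr (fun p hp => hproc' p hp)
        · exact Or.inr h

-- ===== B-side: the main fold =====

lemma pvBestB_fold (minD memo₀ table : PySem.Dict pvK Int) :
    ∀ (ps : List (pvK × pvK)),
      (∀ p ∈ ps, pvVal2 memo₀ table p.1 = some (pvVT minD memo₀ p.1) ∧
                 pvVal2 memo₀ table p.2 = some (pvVT minD memo₀ p.2)) →
      ∀ c : Int,
        ps.foldl
          (fun acc p => acc.bind fun cm =>
            (pvVal2 memo₀ table p.1).bind fun v1 =>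
              (pvVal2 memo₀ table p.2).bind fun v2 =>
                some (max cm (v1 + v2)))
          (some c)
        = some (ps.foldl (fun c p => max c (pvVT minD memo₀ p.1 + pvVT minD memo₀ p.2)) c) := by
  intro ps
  induction ps with
  | nil => intro _ c; rfl
  | cons p rest ihp =>
    intro h c
    obtain ⟨h1, h2⟩ := h p (List.mem_cons_self ..)
    simp only [List.foldl_cons, Option.bind_some, h1, h2]
    exact ihp (fun q hq => h q (List.mem_cons_of_mem _ hq)) _

lemma pvGoB_ok (minD memo₀ : PySem.Dict pvK Int) (N : List pvK)
    (HN : ∀ k ∈ N, pvNS k ∧ memo₀.get? k = none ∧ k.1 ≤ k.2.1 ∧ k.2.2.1 ≤ k.2.2.2 ∧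
      (minD.get? k).isSome ∧ pvClosed memo₀ N k) :
    ∀ (keys : List pvK) (table : PySem.Dict pvK Int),
      pvGood minD memo₀ table →
      (∀ k ∈ keys, k ∈ N) →
      List.Pairwise (fun a b => pvMeasI a ≤ pvMeasI b) keys →
      (∀ q ∈ N, (table.get? q).isSome ∨ q ∈ keys) →
      ∃ table', keys.foldl (pvStepB minD memo₀) (some table) = some table' ∧
        pvGood minD memo₀ table' ∧
        (∀ q ∈ N, (table'.get? q).isSome) := by
  intro keys
  induction keys with
  | nil =>
    intro table hGood _ _ hcov
    exact ⟨table, rfl, hGood, fun q h1 => (hcov q h1).resolve_right (by simp)⟩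
  | cons k rest ihk =>
    intro table hGood hmem hpw hcov
    obtain ⟨hnsk, hmk, hok1, hok2, hminK, hclk⟩ := HN k (hmem k (List.mem_cons_self ..))
    -- every demanded child of k is resolvable through pvVal2
    have havail : ∀ p ∈ pvRowPairs k.1 k.2.1 k.2.2.1 k.2.2.2 ++ pvColPairs k.1 k.2.1 k.2.2.1 k.2.2.2,
        pvVal2 memo₀ table p.1 = some (pvVT minD memo₀ p.1) ∧
        pvVal2 memo₀ table p.2 = some (pvVT minD memo₀ p.2) := by
      intro p hp
      have hme := pvPairs_meas k.1 k.2.1 k.2.2.1 k.2.2.2 p hp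
      rw [pvK_eta] at hme
      have hcl := hclk p hp
      constructor
      · by_cases hss : p.1.1 = p.1.2.1 ∧ p.1.2.2.1 = p.1.2.2.2
        · rw [pvVal2, if_pos hss, pvVT_single minD memo₀ p.1 hss]
        · cases hm0 : memo₀.get? p.1 with
          | some v =>
            rw [pvVal2, if_neg hss, hm0, pvVT_memo minD memo₀ p.1 (by simp only [pvNS]; exact hss) v hm0]
          | none =>
            have hpN : p.1 ∈ N := hcl.1 (by simp only [pvNS]; exact hss) hm0
            obtain ⟨_, _, ho1, ho2, _, _⟩ := HN p.1 hpN
            have : (table.get? p.1).isSome := by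
              rcases hcov p.1 hpN with h | h
              · exact h
              · rcases List.mem_cons.1 h with heq | h
                · exfalso
                  rw [heq] at hme
                  simp only [pvMeas] at hme; omega
                · exfalso
                  have hle := (List.pairwise_cons.1 hpw).1 p.1 h
                  simp only [pvMeasI] at hle
                  simp only [pvMeas] at hme
                  omega
            obtain ⟨v, hv⟩ := Option.isSome_iff_exists.1 this
            rw [pvVal2, if_neg hss, hm0, hv, hGood p.1 v hv]
      · by_cases hss : p.2.1 = p.2.2.1 ∧ p.2.2.2.1 = p.2.2.2.2
        · rw [pvVal2, if_pos hss, pvVT_single minD memo₀ p.2 hss]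
        · cases hm0 : memo₀.get? p.2 with
          | some v =>
            rw [pvVal2, if_neg hss, hm0, pvVT_memo minD memo₀ p.2 (by simp only [pvNS]; exact hss) v hm0]
          | none =>
            have hpN : p.2 ∈ N := hcl.2 (by simp only [pvNS]; exact hss) hm0
            obtain ⟨_, _, ho1, ho2, _, _⟩ := HN p.2 hpN
            have : (table.get? p.2).isSome := by
              rcases hcov p.2 hpN with h | h
              · exact h
              · rcases List.mem_cons.1 h with heq | h
                · exfalso
                  rw [heq] at hme
                  simp only [pvMeas] at hme; omega
                · exfalso
                  have hle := (List.pairwise_cons.1 hpw).1 p.2 h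
                  simp only [pvMeasI] at hle
                  simp only [pvMeas] at hme
                  omega
            obtain ⟨v, hv⟩ := Option.isSome_iff_exists.1 this
            rw [pvVal2, if_neg hss, hm0, hv, hGood p.2 v hv]
    obtain ⟨mv, hmv⟩ := Option.isSome_iff_exists.1 hminK
    have hval : pvVT minD memo₀ k =
        ((pvRowPairs k.1 k.2.1 k.2.2.1 k.2.2.2 ++ pvColPairs k.1 k.2.1 k.2.2.1 k.2.2.2).foldl
          (fun c p => max c (pvVT minD memo₀ p.1 + pvVT minD memo₀ p.2)) 0) + mv := by
      rw [pvVT_compute minD memo₀ k hnsk hmk, hmv]; rfl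
    have hstep : pvStepB minD memo₀ (some table) k =
        some (table.insert k (pvVT minD memo₀ k)) := by
      simp only [pvStepB, Option.bind_some, pvBestB]
      rw [pvBestB_fold minD memo₀ table _ havail 0, hmv, hval]
    have hGood1 : pvGood minD memo₀ (table.insert k (pvVT minD memo₀ k)) := by
      intro k0 v0 h0
      by_cases hk0 : k0 = k
      · subst hk0
        rw [PySem.Dict.get?_insert_self] at h0
        exact (Option.some_inj.1 h0).symm
      · rw [PySem.Dict.get?_insert_of_ne _ _ hk0] at h0
        exact hGood _ _ h0
    have hcov1 : ∀ q ∈ N, ((table.insert k (pvVT minD memo₀ k)).get? q).isSome ∨ q ∈ rest := by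
      intro q hq
      by_cases hk0 : q = k
      · subst hk0; left; rw [PySem.Dict.get?_insert_self]; rfl
      · rw [PySem.Dict.get?_insert_of_ne _ _ hk0]
        rcases hcov q hq with h | h
        · exact Or.inl h
        · rcases List.mem_cons.1 h with heq | h
          · exact absurd heq hk0
          · exact Or.inr h
    have := ihk (table.insert k (pvVT minD memo₀ k)) hGood1
      (fun q hq => hmem q (List.mem_cons_of_mem _ hq)) (List.pairwise_cons.1 hpw).2 hcov1
    simpa only [List.foldl_cons, hstep] using this

-- ===== VERDICT (by name: the statement is the Claim_ definition above) =====
theorem maxCoinOfSubmatrix_spec : Claim_equal_maxCoinOfSubmatrix := by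
  intro matrix top bottom left right minL memoL _hDom hPre
  unfold Spec_maxCoinOfSubmatrix
  set minD := PySem.Dict.ofList (minL.map pvKey5) with hminD
  set memoD := PySem.Dict.ofList (memoL.map pvKey5) with hmemoD
  by_cases hs : top = bottom ∧ left = right
  · have hA : maxCoinOfSubmatrix matrix top bottom left right minL memoL = 0 := by
      simp [maxCoinOfSubmatrix, pvGoA, hs]
    have hB : maxCoinOfSubmatrix_alt matrix top bottom left right minL memoL = 0 := by
      simp [maxCoinOfSubmatrix_alt, hs]
    rw [hA, hB]
  · cases hm : memoD.get? (top, bottom, left, right) with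
    | some v =>
      have hA : maxCoinOfSubmatrix matrix top bottom left right minL memoL = v := by
        simp [maxCoinOfSubmatrix, pvGoA, hs, ← hmemoD, hm]
      have hB : maxCoinOfSubmatrix_alt matrix top bottom left right minL memoL = v := by
        simp [maxCoinOfSubmatrix_alt, hs, ← hmemoD, hm]
      rw [hA, hB]
    | none =>
      -- root not memoized and not single: Pre_ gives an ordered range with full key coverage
      rcases hPre with h | h | h
      · exact absurd h hs
      · rw [PySem.Dict.contains_eq_isSome_get?, ← hmemoD, hm] at h
        exact absurd h (by simp)
      obtain ⟨hTB, hLR, _, _, hKeys⟩ := h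
      have Hmin : ∀ k, pvSub k (top, bottom, left, right) → pvNS k → (minD.get? k).isSome := by
        intro k hsub hns
        have hsub' := hsub
        simp only [pvSub] at hsub'
        have hc := hKeys k.1 (by rw [PySem.List.mem_pyRange_one]; omega)
          k.2.1 (by rw [PySem.List.mem_pyRange_one]; omega)
          k.2.2.1 (by rw [PySem.List.mem_pyRange_one]; omega)
          k.2.2.2 (by rw [PySem.List.mem_pyRange_one]; omega)
          (by simp only [pvNS] at hns; exact hns)
        rw [pvK_eta, PySem.Dict.contains_eq_isSome_get?] at hc
        exact hc
      -- A's value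
      have hInv0 : pvInv minD memoD memoD := ⟨fun _ _ h => h, fun _ _ h => Or.inl h⟩
      obtain ⟨memo', hA, _⟩ := pvGoA_ok minD memoD
        ((bottom - top).toNat + (right - left).toNat + 1) top bottom left right memoD
        (by simp only [pvMeas]; omega) hTB hLR hInv0 Hmin
      have hAval : maxCoinOfSubmatrix matrix top bottom left right minL memoL =
          pvVT minD memoD (top, bottom, left, right) := by
        unfold maxCoinOfSubmatrix
        rw [← hminD, ← hmemoD, hA]
      -- B's value
      set F := (bottom - top).toNat + (right - left).toNat + 1 with hF
      set N := pvCollect memoD F (top, bottom, left, right) [] with hN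
      have hFm : pvMeas (top, bottom, left, right) < F := by simp only [pvMeas, hF]; omega
      have HN : ∀ k ∈ N, pvNS k ∧ memoD.get? k = none ∧ k.1 ≤ k.2.1 ∧ k.2.2.1 ≤ k.2.2.2 ∧
          (minD.get? k).isSome ∧ pvClosed memoD N k := by
        intro k hk
        have hsnd := pvCollect_sound memoD F (top, bottom, left, right) []
          (by simpa using hTB) (by simpa using hLR) k hk
        rcases hsnd with h0 | ⟨hsub, hns, hmn⟩
        · exact absurd h0 (by simp)
        have hcl := pvCollect_closed memoD F (top, bottom, left, right) []
          (by simpa using hTB) (by simpa using hLR) hFm k hk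
        rcases hcl with h0 | hcl
        · exact absurd h0 (by simp)
        have hord := hsub
        simp only [pvSub] at hord
        exact ⟨hns, hmn, by omega, by omega, Hmin k hsub hns, hcl⟩
      have hrootN : (top, bottom, left, right) ∈ N :=
        pvCollect_self memoD F (top, bottom, left, right) [] (by omega)
          (by simp only [pvNS]; exact hs) hm
      obtain ⟨table', hB, hGood', hcov'⟩ := pvGoB_ok minD memoD N HN
        (PySem.List.sorted N pvMeasI false) PySem.Dict.empty
        (fun k v h => by rw [PySem.Dict.get?_empty] at h; cases h)
        (fun k hk => (PySem.List.mem_sorted _ _ _ _).1 hk)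
        (PySem.List.sorted_pairwise _ _)
        (fun q hq => Or.inr ((PySem.List.mem_sorted _ _ _ _).2 hq))
      obtain ⟨v, hv⟩ := Option.isSome_iff_exists.1 (hcov' (top, bottom, left, right) hrootN)
      have hBval : maxCoinOfSubmatrix_alt matrix top bottom left right minL memoL =
          pvVT minD memoD (top, bottom, left, right) := by
        unfold maxCoinOfSubmatrix_alt
        rw [if_neg hs, ← hmemoD, hm, ← hminD, ← hF, ← hN, hB]
        simp only []
        rw [hv, hGood' _ _ hv]
      rw [hAval, hBval]
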